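-- pv_equiv track=rewrite | github.com/salman3757/PyQt6-Password-Generator-Analyzer | main.py | has_alpha_sequence
-- ===== SOURCE A (Python) =====
-- def has_alpha_sequence(password: str) -> bool:
--     """Détecte séquences alphabétiques consécutives (ex: abcd, dcba).
--
--     Args:
--         password (str): Mot de passe.
--
--     Returns:
--         bool: True si séquence détectée.
--     """
--     s = password.lower()
--     for i in range(len(s) - 3):
--         chunk = s[i : i + 4]
--         if all(ord(chunk[j + 1]) - ord(chunk[j]) == 1 for j in range(3)):
--             return True
--         if all(ord(chunk[j]) - ord(chunk[j + 1]) == 1 for j in range(3)):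
--             return True
--     return False
-- ===== SOURCE B (Python) =====
-- def has_alpha_sequence(password: str) -> bool:
--     s = password.lower()
--     asc = 1
--     desc = 1
--     for i in range(1, len(s)):
--         diff = ord(s[i]) - ord(s[i - 1])
--         asc = asc + 1 if diff == 1 else 1
--         desc = desc + 1 if diff == -1 else 1
--         if asc >= 4 or desc >= 4:
--             return True
--     return False
-- ===== Notes on version B (the rewrite author's own statement) =====
-- stated objective: faster
-- what changed: Replaces A's sliding 4-character-window scan (which slices a chunk and re-compares each adjacent pair up to three times via two all(...) window checks) by a single pass over adjacent character pairs maintaining two run-length counters (asc/desc) that report a run of 4.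
import Mathlib
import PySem

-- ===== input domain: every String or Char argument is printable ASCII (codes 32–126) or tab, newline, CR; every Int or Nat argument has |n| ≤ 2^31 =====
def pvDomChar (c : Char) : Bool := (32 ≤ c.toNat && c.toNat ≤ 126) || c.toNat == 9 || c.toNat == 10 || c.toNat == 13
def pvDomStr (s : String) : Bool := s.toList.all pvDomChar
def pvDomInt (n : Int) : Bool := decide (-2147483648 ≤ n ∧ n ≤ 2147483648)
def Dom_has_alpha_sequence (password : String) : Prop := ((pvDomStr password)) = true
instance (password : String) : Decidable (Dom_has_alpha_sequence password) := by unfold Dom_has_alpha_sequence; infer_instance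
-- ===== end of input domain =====

-- B replaces A's sliding 4-character-window re-check by a single pass over adjacent pairs
-- maintaining two run-length counters (each adjacent pair is compared once instead of up to three times).

-- ===== PORT A =====
def ordC (c : Char) : Int := (c.toNat : Int)   -- ord(c)

-- A's two window checks `all(ord(chunk[j+1]) - ord(chunk[j]) == 1 ...)`, combined with ||
-- (= A's two early-return ifs); pyGetD's default is never used: j, j+1 < 4 = chunk's length.
def chunkOK (chunk : List Char) : Bool :=
  ((PySem.List.pyRange 0 3 1).all fun j =>
     ordC (PySem.List.pyGetD chunk (j+1) 'a') - ordC (PySem.List.pyGetD chunk j 'a') == 1) ||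
  ((PySem.List.pyRange 0 3 1).all fun j =>
     ordC (PySem.List.pyGetD chunk j 'a') - ordC (PySem.List.pyGetD chunk (j+1) 'a') == 1)

def has_alpha_sequence (password : String) : Bool :=
  let s := (PySem.Str.lower password).toList
  (PySem.List.pyRange 0 ((s.length : Int) - 3) 1).any fun i =>
    chunkOK (PySem.List.slice s (some i) (some (i + 4)))

-- ===== PORT B =====
-- the loop of Source B: prev = s[i-1]; asc/desc = current ascending/descending run lengths
def altGo : Char → Int → Int → List Char → Bool
  | _, _, _, [] => false
  | prev, asc, desc, c :: rest =>
    let diff := ordC c - ordC prev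
    let asc' := if diff = 1 then asc + 1 else 1
    let desc' := if diff = -1 then desc + 1 else 1
    if 4 ≤ asc' ∨ 4 ≤ desc' then true else altGo c asc' desc' rest

def has_alpha_sequence_alt (password : String) : Bool :=
  match (PySem.Str.lower password).toList with
  | [] => false
  | c :: rest => altGo c 1 1 rest

-- ===== PRECONDITION & SPEC =====
def Spec_has_alpha_sequence (password : String) (out : Bool) : Prop := out = has_alpha_sequence_alt password
instance (password : String) (out : Bool) : Decidable (Spec_has_alpha_sequence password out) := by unfold Spec_has_alpha_sequence; infer_instance

-- ===== CLAIM (what is proved, stated in full; the proofs are below) =====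
def Claim_equal_has_alpha_sequence : Prop := ∀ (password : String), Dom_has_alpha_sequence password → Spec_has_alpha_sequence password (has_alpha_sequence password)

-- ===== LEMMAS AND PROOFS =====

-- `ascExt p k l` : the first k characters of l continue an ascending (+1) run from p
def ascExt : Char → Nat → List Char → Bool
  | _, 0, _ => true
  | _, _ + 1, [] => false
  | p, k + 1, c :: rest => (ordC c - ordC p == 1) && ascExt c k rest

def descExt : Char → Nat → List Char → Bool
  | _, 0, _ => true
  | _, _ + 1, [] => false
  | p, k + 1, c :: rest => (ordC p - ordC c == 1) && descExt c k rest

-- the common characterisation: some position starts a 4-long ascending or descending run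
def win4 : List Char → Bool
  | [] => false
  | a :: rest => (ascExt a 3 rest || descExt a 3 rest) || win4 rest

lemma ascExt_short : ∀ (k : Nat) (p : Char) (l : List Char), l.length < k → ascExt p k l = false := by
  intro k
  induction k with
  | zero => intro p l h; omega
  | succ k ih =>
    intro p l h
    cases l with
    | nil => simp [ascExt]
    | cons c rest => simp [ascExt]; intro _; exact ih c rest (by simpa using h)

lemma descExt_short : ∀ (k : Nat) (p : Char) (l : List Char), l.length < k → descExt p k l = false := by
  intro k
  induction k with
  | zero => intro p l h; omega
  | succ k ih =>
    intro p l h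
    cases l with
    | nil => simp [descExt]
    | cons c rest => simp [descExt]; intro _; exact ih c rest (by simpa using h)

lemma ascExt_mono : ∀ (l : List Char) (p : Char) (j k : Nat), j ≤ k → ascExt p k l = true → ascExt p j l = true := by
  intro l
  induction l with
  | nil =>
    intro p j k hjk h
    cases k with
    | zero => cases j with | zero => simp [ascExt] | succ j => omega
    | succ k => simp [ascExt] at h
  | cons c rest ih =>
    intro p j k hjk h
    cases j with
    | zero => simp [ascExt]
    | succ j =>
      cases k with
      | zero => omega
      | succ k =>
        simp [ascExt] at h ⊢
        exact ⟨h.1, ih c j k (by omega) h.2⟩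

lemma descExt_mono : ∀ (l : List Char) (p : Char) (j k : Nat), j ≤ k → descExt p k l = true → descExt p j l = true := by
  intro l
  induction l with
  | nil =>
    intro p j k hjk h
    cases k with
    | zero => cases j with | zero => simp [descExt] | succ j => omega
    | succ k => simp [descExt] at h
  | cons c rest ih =>
    intro p j k hjk h
    cases j with
    | zero => simp [descExt]
    | succ j =>
      cases k with
      | zero => omega
      | succ k =>
        simp [descExt] at h ⊢
        exact ⟨h.1, ih c j k (by omega) h.2⟩

-- B-side: the counter loop computes win4 plus the "credit" carried in by the counters
lemma altGo_eq : ∀ (l : List Char) (prev : Char) (a d : Nat), 1 ≤ a → a ≤ 3 → 1 ≤ d → d ≤ 3 →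
    altGo prev (a : Int) (d : Int) l
      = (ascExt prev (4 - a) l || descExt prev (4 - d) l || win4 l) := by
  intro l
  induction l with
  | nil =>
    intro prev a d ha1 ha3 hd1 hd3
    obtain ⟨a', rfl⟩ : ∃ a', a = a' + 1 := ⟨a - 1, by omega⟩
    obtain ⟨d', rfl⟩ : ∃ d', d = d' + 1 := ⟨d - 1, by omega⟩
    simp [altGo, win4]
    constructor
    · obtain ⟨k, hk⟩ : ∃ k, 3 - a' = k + 1 := ⟨2 - a', by omega⟩
      rw [hk]; rfl
    · obtain ⟨k, hk⟩ : ∃ k, 3 - d' = k + 1 := ⟨2 - d', by omega⟩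
      rw [hk]; rfl
  | cons c rest ih =>
    intro prev a d ha1 ha3 hd1 hd3
    by_cases hup : ordC c - ordC prev = 1
    · have hdn : ¬ (ordC prev - ordC c = 1) := by omega
      by_cases ha : a = 3
      · subst ha
        have hL : altGo prev (3:Int) (d:Int) (c :: rest) = true := by
          simp [altGo, hup]
        have hasc : ascExt prev (4-3) (c :: rest) = true := by
          simp [ascExt, hup]
        simp [hL, hasc]
      · have hstep : altGo prev (a:Int) (d:Int) (c :: rest) = altGo c ((a:Int)+1) 1 rest := by
          simp [altGo, hup]
          omega
        have hih := ih c (a+1) 1 (by omega) (by omega) (by omega) (by omega)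
        push_cast at hih
        rw [hstep, hih]
        have e1 : ascExt prev (4-a) (c :: rest) = ascExt c (4-(a+1)) rest := by
          have : 4 - a = (4 - (a+1)) + 1 := by omega
          rw [this]; simp [ascExt, hup]
        have e2 : descExt prev (4-d) (c :: rest) = false := by
          have : 4 - d = (3 - d) + 1 := by omega
          rw [this]; simp [descExt, hdn]
        rw [e1, e2]
        have h43 : 4 - (a+1) = 3 - a := by omega
        rw [h43]
        show (ascExt c (3-a) rest || descExt c 3 rest || win4 rest)
           = (ascExt c (3-a) rest || false || win4 (c :: rest))
        simp [win4]
        cases h3 : ascExt c 3 rest with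
        | false => simp [Bool.or_assoc]
        | true =>
          have := ascExt_mono rest c (3-a) 3 (by omega) h3
          simp [this]
    · by_cases hdn : ordC prev - ordC c = 1
      · by_cases hd : d = 3
        · subst hd
          have hL : altGo prev (a:Int) (3:Int) (c :: rest) = true := by
            have hne : ordC c - ordC prev = -1 := by omega
            simp [altGo, hne]
          have hdesc : descExt prev (4-3) (c :: rest) = true := by
            simp [descExt, hdn]
          simp [hL, hdesc]
        · have hne : ordC c - ordC prev = -1 := by omega
          have hstep : altGo prev (a:Int) (d:Int) (c :: rest) = altGo c 1 ((d:Int)+1) rest := by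
            simp [altGo, hne]
            omega
          have hih := ih c 1 (d+1) (by omega) (by omega) (by omega) (by omega)
          push_cast at hih
          rw [hstep, hih]
          have e1 : descExt prev (4-d) (c :: rest) = descExt c (4-(d+1)) rest := by
            have : 4 - d = (4 - (d+1)) + 1 := by omega
            rw [this]; simp [descExt, hdn]
          have e2 : ascExt prev (4-a) (c :: rest) = false := by
            have : 4 - a = (3 - a) + 1 := by omega
            rw [this]; simp [ascExt, hup]
          rw [e1, e2]
          have h43 : 4 - (d+1) = 3 - d := by omega
          rw [h43]
          show (ascExt c 3 rest || descExt c (3-d) rest || win4 rest)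
             = (false || descExt c (3-d) rest || win4 (c :: rest))
          simp [win4]
          cases h3 : descExt c 3 rest with
          | false => simp [Bool.or_assoc, Bool.or_comm]
          | true =>
            have := descExt_mono rest c (3-d) 3 (by omega) h3
            simp [this]
      · have hne1 : ¬ (ordC c - ordC prev = -1) := by omega
        have hstep : altGo prev (a:Int) (d:Int) (c :: rest) = altGo c 1 1 rest := by
          simp [altGo, hup, hne1]
        have hih := ih c 1 1 (by omega) (by omega) (by omega) (by omega)
        norm_num at hih
        rw [hstep, hih]
        have e1 : ascExt prev (4-a) (c :: rest) = false := by
          have : 4 - a = (3 - a) + 1 := by omega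
          rw [this]; simp [ascExt, hup]
        have e2 : descExt prev (4-d) (c :: rest) = false := by
          have : 4 - d = (3 - d) + 1 := by omega
          rw [this]; simp [descExt, hdn]
        rw [e1, e2]
        simp [win4]

-- A's window check on a 4-character chunk is the run check at its head
lemma chunk4 : ∀ (a b c d : Char) (t : List Char),
    chunkOK [a, b, c, d] = (ascExt a 3 (b :: c :: d :: t) || descExt a 3 (b :: c :: d :: t)) := by
  intro a b c d t
  have h : PySem.List.pyRange 0 3 1 = [0, 1, 2] := by decide
  simp [chunkOK, h, ascExt, descExt, pysem]

-- A-side: the index-window scan, in Nat form, is win4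
lemma natBridge : ∀ (s : List Char),
    (List.range (s.length - 3)).any (fun k => chunkOK ((s.drop k).take 4)) = win4 s := by
  intro s
  induction s with
  | nil => simp [win4]
  | cons c rest ih =>
    by_cases h : rest.length < 3
    · have hw : win4 rest = false := by
        rw [← ih]
        have h2 : rest.length - 3 = 0 := by omega
        rw [h2]; simp
      have h0 : (c :: rest).length - 3 = 0 := by simp; omega
      rw [h0]
      simp [win4, hw, ascExt_short 3 c rest (by omega), descExt_short 3 c rest (by omega)]
    · match rest, h, ih with
      | [], h, _ => simp at h
      | [x], h, _ => simp at h
      | [x, y], h, _ => simp at h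
      | b :: cc :: d :: t, h, ih =>
        have hlen : (c :: b :: cc :: d :: t).length - 3 = ((b :: cc :: d :: t).length - 3) + 1 := by
          simp
        rw [hlen, List.range_succ_eq_map]
        simp only [List.any_cons, List.any_map]
        show (chunkOK ((c :: b :: cc :: d :: t).take 4)
              || (List.range ((b :: cc :: d :: t).length - 3)).any
                   (fun k => chunkOK (((b :: cc :: d :: t).drop k).take 4)))
           = win4 (c :: b :: cc :: d :: t)
        rw [ih]
        show (chunkOK [c, b, cc, d] || win4 (b :: cc :: d :: t)) = win4 (c :: b :: cc :: d :: t)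
        rw [chunk4 c b cc d t]
        rfl

lemma alt_eq_win4 (password : String) :
    has_alpha_sequence_alt password = win4 (PySem.Str.lower password).toList := by
  unfold has_alpha_sequence_alt
  cases hs : (PySem.Str.lower password).toList with
  | nil => rfl
  | cons c rest =>
    have h := altGo_eq rest c 1 1 (by omega) (by omega) (by omega) (by omega)
    norm_num at h
    show altGo c 1 1 rest = win4 (c :: rest)
    rw [h]
    rfl

lemma a_eq_win4 (password : String) :
    has_alpha_sequence password = win4 (PySem.Str.lower password).toList := by
  unfold has_alpha_sequence
  set s := (PySem.Str.lower password).toList with hs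
  show (PySem.List.pyRange 0 ((s.length : Int) - 3) 1).any
      (fun i => chunkOK (PySem.List.slice s (some i) (some (i + 4)))) = win4 s
  rw [PySem.List.pyRange_one]
  have ht : ((s.length : Int) - 3 - 0).toNat = s.length - 3 := by omega
  rw [List.any_map, ht]
  have hfun : ((fun i => chunkOK (PySem.List.slice s (some i) (some (i + 4)))) ∘ fun k : Nat => 0 + (k : Int))
      = (fun k : Nat => chunkOK ((s.drop k).take 4)) := by
    funext k
    simp only [Function.comp, zero_add]
    have h4 : (k : Int) + 4 = ((k : Int)) + ((4 : Nat) : Int) := by norm_num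
    rw [h4, PySem.List.slice_natCast_add]
  rw [hfun, natBridge s]

-- ===== VERDICT (by name: the statement is the Claim_ definition above) =====
theorem has_alpha_sequence_spec : Claim_equal_has_alpha_sequence := by
  intro password _
  unfold Spec_has_alpha_sequence
  rw [a_eq_win4, alt_eq_win4]
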